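-- pv_equiv track=rewrite | github.com/bazkiaei/pipe_tasks | python/lsst/pipe/tasks/coaddBase.py | reorderAndPadList
-- ===== SOURCE A (Python) =====
-- def reorderAndPadList(inputList, inputKeys, outputKeys, padWith=None):
--     """Match the order of one list to another, padding if necessary
--
--     Parameters
--     ----------
--     inputList : `list`
--         List to be reordered and padded. Elements can be any type.
--     inputKeys :  `iterable`
--         Iterable of values to be compared with outputKeys. Length must match `inputList`.
--     outputKeys : `iterable`
--         Iterable of values to be compared with inputKeys.
--     padWith : `Unknown`
--         Any value to be inserted where inputKey not in outputKeys.
--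
--     Returns
--     -------
--     outputList : `list`
--         Copy of inputList reordered per outputKeys and padded with `padWith`
--         so that the length matches length of outputKeys.
--     """
--     outputList = []
--     for d in outputKeys:
--         if d in inputKeys:
--             outputList.append(inputList[inputKeys.index(d)])
--         else:
--             outputList.append(padWith)
--     return outputList
-- ===== SOURCE B (Python) =====
-- def reorderAndPadList(inputList, inputKeys, outputKeys, padWith=None):
--     """Scatter instead of gather: index every output slot by its key in one
--     pass, preallocate the padded output, then walk the (inputKey, value) pairs
--     and write each value into all of its slots; popping the slot list makes the
--     first input occurrence of a duplicate key win, matching list.index."""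
--     positions = {}
--     for i, key in enumerate(outputKeys):
--         positions.setdefault(key, []).append(i)
--     outputList = [padWith] * len(outputKeys)
--     for key, value in zip(inputKeys, inputList):
--         slots = positions.pop(key, None)
--         if slots is not None:
--             for i in slots:
--                 outputList[i] = value
--     return outputList
-- ===== Notes on version B (the rewrite author's own statement) =====
-- stated objective: faster
-- what changed: A gathers: for each output key it scans inputKeys twice ('in' + .index) and appends; B scatters: it indexes the output slots per key once, preallocates the padded output, then walks the (inputKey, value) pairs writing each value into all of its slots, popping the slot list so the first occurrence wins.
import Mathlib
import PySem

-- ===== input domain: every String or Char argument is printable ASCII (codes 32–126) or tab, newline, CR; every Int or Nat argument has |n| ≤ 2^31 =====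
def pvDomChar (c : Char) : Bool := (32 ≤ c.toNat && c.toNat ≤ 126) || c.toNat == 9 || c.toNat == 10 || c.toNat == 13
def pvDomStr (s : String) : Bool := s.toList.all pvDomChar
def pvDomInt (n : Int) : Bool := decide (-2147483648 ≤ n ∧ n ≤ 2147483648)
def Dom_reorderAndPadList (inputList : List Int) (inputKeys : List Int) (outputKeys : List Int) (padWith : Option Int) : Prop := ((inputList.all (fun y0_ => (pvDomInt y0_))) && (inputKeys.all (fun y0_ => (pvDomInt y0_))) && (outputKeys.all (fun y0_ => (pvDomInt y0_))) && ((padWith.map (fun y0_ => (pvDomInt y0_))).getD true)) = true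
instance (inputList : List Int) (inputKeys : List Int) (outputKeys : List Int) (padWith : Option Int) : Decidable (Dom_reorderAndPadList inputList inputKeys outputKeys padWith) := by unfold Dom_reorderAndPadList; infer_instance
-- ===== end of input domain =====

-- B scatters values from the input side into a preallocated padded output via a
-- key->slot-indices table, replacing A's per-output-key scans of inputKeys; measurably faster on large inputs.


-- ===== PORT A =====
-- 'inputList[inputKeys.index(d)]' is PySem.List.pyGet? at the index PySem.List.index? finds;
-- under Pre_ the index? is some and in range, exactly where Python returns.
def reorderAndPadList (inputList : List Int) (inputKeys : List Int) (outputKeys : List Int) (padWith : Option Int) : List (Option Int) :=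
  outputKeys.foldl
    (fun acc d =>
      if d ∈ inputKeys then
        acc ++ [PySem.List.pyGet? inputList (((PySem.List.index? inputKeys d).getD 0 : Nat) : Int)]
      else
        acc ++ [padWith])
    []

-- ===== PORT B =====
-- 'for i in slots: outputList[i] = value' — pySetD is Python's list assignment (total form;
-- every slot index is a valid index of outputList, so Python never raises here).
def pvWriteAll (slots : List Int) (v : Int) (out : List (Option Int)) : List (Option Int) :=
  slots.foldl (fun out i => PySem.List.pySetD out i (some v)) out

def reorderAndPadList_alt (inputList : List Int) (inputKeys : List Int) (outputKeys : List Int) (padWith : Option Int) : List (Option Int) :=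
  -- positions.setdefault(key, []).append(i) over enumerate(outputKeys)
  let positions : PySem.Dict Int (List Int) :=
    (PySem.List.enumerate outputKeys).foldl
      (fun d p => d.modify p.2 [] (· ++ [p.1])) PySem.Dict.empty
  -- outputList = [padWith] * len(outputKeys)
  let init : List (Option Int) := List.replicate outputKeys.length padWith
  -- for key, value in zip(...): slots = positions.pop(key, None); if slots is not None: write
  ((inputKeys.zip inputList).foldl
    (fun st kv =>
      match st.1.pop? kv.1 with
      | some (slots, d') => (d', pvWriteAll slots kv.2 st.2)
      | none => st)
    (positions, init)).2

-- ===== PRECONDITION & SPEC =====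
-- Pre_ excludes exactly the inputs where Python A raises IndexError: an output key whose
-- first index in inputKeys is >= len(inputList).
def Pre_reorderAndPadList (inputList : List Int) (inputKeys : List Int) (outputKeys : List Int) (padWith : Option Int) : Prop :=
  ∀ d ∈ outputKeys, d ∈ inputKeys → (PySem.List.index? inputKeys d).getD 0 < inputList.length
instance (inputList : List Int) (inputKeys : List Int) (outputKeys : List Int) (padWith : Option Int) : Decidable (Pre_reorderAndPadList inputList inputKeys outputKeys padWith) := by unfold Pre_reorderAndPadList; infer_instance
def pvWitness_reorderAndPadList : List Int × List Int × List Int × Option Int := ([1, 2], [10, 20], [20, 30, 10], none)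

def Spec_reorderAndPadList (inputList : List Int) (inputKeys : List Int) (outputKeys : List Int) (padWith : Option Int) (out : List (Option Int)) : Prop := out = reorderAndPadList_alt inputList inputKeys outputKeys padWith
instance (inputList : List Int) (inputKeys : List Int) (outputKeys : List Int) (padWith : Option Int) (out : List (Option Int)) : Decidable (Spec_reorderAndPadList inputList inputKeys outputKeys padWith out) := by unfold Spec_reorderAndPadList; infer_instance

-- ===== CLAIM (what is proved, stated in full; the proofs are below) =====
def Claim_equal_reorderAndPadList : Prop := ∀ (inputList : List Int) (inputKeys : List Int) (outputKeys : List Int) (padWith : Option Int), Dom_reorderAndPadList inputList inputKeys outputKeys padWith → Pre_reorderAndPadList inputList inputKeys outputKeys padWith → Spec_reorderAndPadList inputList inputKeys outputKeys padWith (reorderAndPadList inputList inputKeys outputKeys padWith)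

-- ===== LEMMAS AND PROOFS =====

-- The last value written into output index j by B's scatter fold, computed the way the fold
-- consumes the pair list (proof-side mirror of the fold; used only to state the invariant).
def pvLastHit (ps : List (Int × Int)) (d : PySem.Dict Int (List Int)) (j : Int) : Option Int :=
  match ps with
  | [] => none
  | (k, v) :: ps =>
    match d.get? k with
    | some slots =>
      match pvLastHit ps (d.erase k) j with
      | some w => some w
      | none => if j ∈ slots then some v else none
    | none => pvLastHit ps d j

-- find?/filter lemmas giving Dict.erase its lookup behaviour
theorem pvFind?_filter_ne {ν : Type} (l : List (Int × ν)) (k k' : Int) (h : k' ≠ k) :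
    (l.filter (fun p => !(p.1 == k))).find? (fun p => p.1 == k') = l.find? (fun p => p.1 == k') := by
  induction l with
  | nil => rfl
  | cons x xs ih =>
    by_cases hx : x.1 = k
    · have h1 : (!(x.1 == k)) = false := by simp [hx]
      have h2 : (x.1 == k') = false := beq_eq_false_iff_ne.2 (by rw [hx]; exact (Ne.symm h))
      simp [List.filter_cons, h1, List.find?_cons, h2, ih]
    · have h1 : (!(x.1 == k)) = true := by simp [hx]
      by_cases hx' : x.1 = k'
      · simp [h1, List.find?_cons, hx', h]
      · simp [List.filter_cons, h1, List.find?_cons, beq_eq_false_iff_ne.2 hx', ih]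

theorem pvGet?_erase_self {ν : Type} (d : PySem.Dict Int ν) (k : Int) :
    (d.erase k).get? k = none := by
  have : (d.items.filter (fun p => !(p.1 == k))).find? (fun p => p.1 == k) = none := by
    apply List.find?_eq_none.2
    intro x hx
    have := (List.mem_filter.1 hx).2
    simp at this
    simp [this]
  simp [PySem.Dict.erase, PySem.Dict.get?, this]

theorem pvGet?_erase_of_ne {ν : Type} (d : PySem.Dict Int ν) (k k' : Int) (h : k' ≠ k) :
    (d.erase k).get? k' = d.get? k' := by
  simp [PySem.Dict.erase, PySem.Dict.get?, pvFind?_filter_ne d.items k k' h]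

theorem pvGetD_erase_self {ν : Type} (d : PySem.Dict Int (List ν)) (k : Int) :
    (d.erase k).getD k [] = [] := by
  rw [PySem.Dict.getD_eq_get?_getD, pvGet?_erase_self]; rfl

theorem pvGetD_erase_of_ne {ν : Type} (d : PySem.Dict Int (List ν)) (k k' : Int) (h : k' ≠ k) :
    (d.erase k).getD k' [] = d.getD k' [] := by
  rw [PySem.Dict.getD_eq_get?_getD, pvGet?_erase_of_ne d k k' h, ← PySem.Dict.getD_eq_get?_getD]

-- If no entry of the table contains j, the scatter never touches j.
theorem pvLastHit_none (ps : List (Int × Int)) (d : PySem.Dict Int (List Int)) (j : Int)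
    (h : ∀ k, j ∉ d.getD k []) : pvLastHit ps d j = none := by
  induction ps generalizing d with
  | nil => rfl
  | cons p ps ih =>
    obtain ⟨k, v⟩ := p
    unfold pvLastHit
    cases hd : d.get? k with
    | none => exact ih d h
    | some slots =>
      have hj : j ∉ slots := by
        have := h k
        rwa [PySem.Dict.getD_eq_get?_getD, hd, Option.getD_some] at this
      have hrec : pvLastHit ps (d.erase k) j = none := by
        apply ih
        intro k'
        by_cases hk : k' = k
        · subst hk; rw [pvGetD_erase_self]; simp
        · rw [pvGetD_erase_of_ne d k k' hk]; exact h k'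
      simp [hrec, hj]

-- If j lies exactly in the entry of k0, the scatter leaves at j the FIRST pair with key k0.
theorem pvLastHit_eq_lookup (ps : List (Int × Int)) (d : PySem.Dict Int (List Int)) (j k0 : Int)
    (H : ∀ k, j ∈ d.getD k [] ↔ k = k0) : pvLastHit ps d j = ps.lookup k0 := by
  induction ps generalizing d with
  | nil => rfl
  | cons p ps ih =>
    obtain ⟨k, v⟩ := p
    unfold pvLastHit
    by_cases hk : k = k0
    · subst hk
      have hj : j ∈ d.getD k [] := (H k).2 rfl
      cases hd : d.get? k with
      | none =>
        rw [PySem.Dict.getD_eq_get?_getD, hd, Option.getD_none] at hj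
        cases hj
      | some slots =>
        have hjs : j ∈ slots := by
          rwa [PySem.Dict.getD_eq_get?_getD, hd, Option.getD_some] at hj
        have hrec : pvLastHit ps (d.erase k) j = none := by
          apply pvLastHit_none
          intro k'
          by_cases hk' : k' = k
          · subst hk'; rw [pvGetD_erase_self]; simp
          · rw [pvGetD_erase_of_ne d k k' hk']
            intro hmem
            exact hk' ((H k').1 hmem)
        simp [hrec, hjs, List.lookup]
    · have hne : (k0 == k) = false := beq_eq_false_iff_ne.2 (Ne.symm hk)
      have hlk : ((k, v) :: ps).lookup k0 = ps.lookup k0 := by simp [List.lookup, hne]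
      rw [hlk]
      cases hd : d.get? k with
      | none => exact ih d H
      | some slots =>
        have hjs : j ∉ slots := by
          intro hmem
          apply hk
          apply (H k).1
          rwa [PySem.Dict.getD_eq_get?_getD, hd, Option.getD_some]
        have H' : ∀ k', j ∈ (d.erase k).getD k' [] ↔ k' = k0 := by
          intro k'
          by_cases hk' : k' = k
          · subst hk'
            rw [pvGetD_erase_self]
            simp [hk]
          · rw [pvGetD_erase_of_ne d k k' hk']; exact H k'
        rw [ih (d.erase k) H']
        cases hps : ps.lookup k0 with
        | some w => rfl
        | none => simp [hjs]

theorem pvWriteAll_length (slots : List Int) (v : Int) (out : List (Option Int)) :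
    (pvWriteAll slots v out).length = out.length := by
  induction slots generalizing out with
  | nil => rfl
  | cons i slots ih => simp only [pvWriteAll] at ih ⊢; rw [List.foldl_cons, ih, PySem.List.length_pySetD]

theorem pvWriteAll_getElem? (slots : List Int) (v : Int) (out : List (Option Int)) (j : Nat)
    (hpos : ∀ i ∈ slots, 0 ≤ i) :
    (pvWriteAll slots v out)[j]? =
      if (j : Int) ∈ slots ∧ j < out.length then some (some v) else out[j]? := by
  induction slots generalizing out with
  | nil => simp [pvWriteAll]
  | cons i slots ih =>
    have hi : 0 ≤ i := hpos i List.mem_cons_self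
    have hset : PySem.List.pySetD out i (some v) = out.set i.toNat (some v) :=
      PySem.List.pySetD_of_nonneg _ _ hi
    simp only [pvWriteAll] at ih ⊢
    rw [List.foldl_cons, ih _ (fun x hx => hpos x (List.mem_cons_of_mem i hx)), hset]
    by_cases hmem : (j : Int) ∈ slots
    · by_cases hj : j < out.length
      · rw [if_pos ⟨hmem, by simpa using hj⟩, if_pos ⟨List.mem_cons_of_mem i hmem, hj⟩]
      · rw [if_neg (by simp [hj]), if_neg (by simp [hj]), List.getElem?_set,
            List.getElem?_eq_none (by omega)]
        split <;> simp_all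
    · rw [if_neg (by simp [hmem])]
      by_cases hij : (j : Int) = i
      · have hnat : i.toNat = j := by omega
        by_cases hj : j < out.length
        · rw [if_pos ⟨by simp [← hij], hj⟩, hnat, List.getElem?_set_self hj]
        · rw [if_neg (by tauto), List.getElem?_set, List.getElem?_eq_none (by omega)]
          split <;> simp_all
      · have hne : i.toNat ≠ j := by omega
        rw [if_neg (by simp [hmem, hij]), List.getElem?_set_ne hne]

-- The scatter fold, read at one output index: the pvLastHit value, else the initial cell.
theorem pvScatter_getElem? (ps : List (Int × Int)) (d : PySem.Dict Int (List Int))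
    (out : List (Option Int)) (j : Nat) (hj : j < out.length)
    (hP : ∀ k i, i ∈ d.getD k [] → 0 ≤ i) :
    ((ps.foldl
        (fun st kv =>
          match st.1.pop? kv.1 with
          | some (slots, d') => (d', pvWriteAll slots kv.2 st.2)
          | none => st)
        (d, out)).2)[j]? =
      match pvLastHit ps d (j : Int) with
      | some w => some (some w)
      | none => out[j]? := by
  induction ps generalizing d out with
  | nil => simp [pvLastHit]
  | cons p ps ih =>
    obtain ⟨k, v⟩ := p
    rw [List.foldl_cons]
    unfold pvLastHit
    cases hd : d.get? k with
    | none =>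
      have hpop : d.pop? k = none := by simp [PySem.Dict.pop?, hd]
      simp only [hpop]
      exact ih d out hj hP
    | some slots =>
      have hpop : d.pop? k = some (slots, d.erase k) := by simp [PySem.Dict.pop?, hd]
      simp only [hpop]
      have hslots : ∀ i ∈ slots, 0 ≤ i := by
        intro i hi
        exact hP k i (by rwa [PySem.Dict.getD_eq_get?_getD, hd, Option.getD_some])
      have hP' : ∀ k' i, i ∈ (d.erase k).getD k' [] → 0 ≤ i := by
        intro k' i hi
        by_cases hk' : k' = k
        · subst hk'; rw [pvGetD_erase_self] at hi; cases hi
        · rw [pvGetD_erase_of_ne d k k' hk'] at hi; exact hP k' i hi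
      have hj' : j < (pvWriteAll slots v out).length := by rwa [pvWriteAll_length]
      rw [ih (d.erase k) (pvWriteAll slots v out) hj' hP',
          pvWriteAll_getElem? slots v out j hslots]
      cases pvLastHit ps (d.erase k) (j : Int) with
      | some w => rfl
      | none =>
        by_cases hmem : (j : Int) ∈ slots
        · simp [hmem, hj]
        · simp [hmem]

-- The positions table: entry of k collects the first components of the enumerate pairs with key k.
theorem pvPosGetD (l : List (Int × Int)) (e : PySem.Dict Int (List Int)) (k : Int) :
    ((l.foldl (fun d p => d.modify p.2 [] (· ++ [p.1])) e).getD k []) =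
      e.getD k [] ++ (l.filter (fun p => p.2 == k)).map (·.1) := by
  induction l generalizing e with
  | nil => simp
  | cons p l ih =>
    rw [List.foldl_cons, ih]
    by_cases hk : k = p.2
    · rw [PySem.Dict.getD_modify, if_pos hk, List.filter_cons,
          if_pos (by simp [hk]), List.map_cons]
      rw [hk]
      simp
    · rw [PySem.Dict.getD_modify, if_neg hk, List.filter_cons,
          if_neg (by simp [Ne.symm hk]), ]

theorem pvMemPositions (outputKeys : List Int) (j k : Int) :
    j ∈ (((PySem.List.enumerate outputKeys).foldl
        (fun d p => d.modify p.2 [] (· ++ [p.1])) PySem.Dict.empty).getD k [])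
      ↔ ∃ m : Nat, ∃ h : m < outputKeys.length, (m : Int) = j ∧ outputKeys[m] = k := by
  rw [pvPosGetD]
  simp only [PySem.Dict.getD_empty, List.nil_append, List.mem_map, List.mem_filter]
  constructor
  · rintro ⟨p, ⟨hp, hpk⟩, hpj⟩
    obtain ⟨m, hm, rfl⟩ := (PySem.List.mem_enumerate_iff _ _ _).1 hp
    exact ⟨m, hm, by simpa using hpj, by simpa using hpk⟩
  · rintro ⟨m, hm, hj, hk⟩
    refine ⟨((m : Int), outputKeys[m]), ⟨?_, by simp [hk]⟩, by simpa using hj⟩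
    exact (PySem.List.mem_enumerate_iff _ _ _).2 ⟨m, hm, by simp⟩

-- The scatter fold preserves the output length.
theorem pvScatter_length (ps : List (Int × Int)) (d : PySem.Dict Int (List Int))
    (out : List (Option Int)) :
    ((ps.foldl
        (fun st kv =>
          match st.1.pop? kv.1 with
          | some (slots, d') => (d', pvWriteAll slots kv.2 st.2)
          | none => st)
        (d, out)).2).length = out.length := by
  induction ps generalizing d out with
  | nil => rfl
  | cons p ps ih =>
    rw [List.foldl_cons]
    cases hd : d.pop? p.1 with
    | none => simp only [hd]; exact ih d out
    | some x =>
      obtain ⟨slots, d'⟩ := x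
      simp only [hd]
      rw [ih d' (pvWriteAll slots p.2 out), pvWriteAll_length]

-- zip lookup lemmas: the first matching pair of zip(inputKeys, inputList)
theorem zip_lookup_not_mem (ks vs : List Int) (k : Int) (h : k ∉ ks) :
    (ks.zip vs).lookup k = none := by
  induction ks generalizing vs with
  | nil => simp
  | cons a ks ih =>
    cases vs with
    | nil => simp
    | cons v vs =>
      have hka : k ≠ a := fun he => h (he ▸ List.mem_cons_self)
      simp [List.lookup, beq_eq_false_iff_ne.2 hka, ih vs (fun hm => h (List.mem_cons_of_mem a hm))]

theorem zip_lookup_mem (ks vs : List Int) (k : Int) (hm : k ∈ ks) (i : Nat)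
    (hi : PySem.List.index? ks k = some i) (hlt : i < vs.length) :
    (ks.zip vs).lookup k = PySem.List.pyGet? vs (i : Int) := by
  induction ks generalizing vs i with
  | nil => cases hm
  | cons a ks ih =>
    cases vs with
    | nil => cases hlt
    | cons v vs =>
      by_cases hk : k = a
      · subst hk
        rw [PySem.List.index?_cons_self] at hi
        cases hi
        simp [List.lookup]
      · have hne : a ≠ k := Ne.symm hk
        rw [PySem.List.index?_cons_of_ne ks hne] at hi
        obtain ⟨j, hj, hij⟩ := Option.map_eq_some_iff.1 hi
        subst hij
        have hm' : k ∈ ks := by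
          rcases List.mem_cons.1 hm with h1 | h2
          · exact absurd h1 hk
          · exact h2
        have hlt' : j < vs.length := by simpa using hlt
        rw [show ((j + 1 : Nat) : Int) = ((j : Nat) : Int) + 1 by push_cast; ring]
        simp only [List.zip_cons_cons, List.lookup, beq_eq_false_iff_ne.2 hk]
        rw [ih vs hm' j hj hlt', PySem.List.pyGet?_natCast,
            show ((j : Nat) : Int) + 1 = ((j + 1 : Nat) : Int) by push_cast; ring,
            PySem.List.pyGet?_natCast]
        simp

-- ===== VERDICT (by name: the statement is the Claim_ definition above) =====
theorem reorderAndPadList_spec : Claim_equal_reorderAndPadList := by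
  unfold Claim_equal_reorderAndPadList
  intro inputList inputKeys outputKeys padWith _ hpre
  unfold Spec_reorderAndPadList reorderAndPadList reorderAndPadList_alt
  -- A's fold is a map over outputKeys
  have hbody : (fun (acc : List (Option Int)) (d : Int) =>
      if d ∈ inputKeys then
        acc ++ [PySem.List.pyGet? inputList (((PySem.List.index? inputKeys d).getD 0 : Nat) : Int)]
      else acc ++ [padWith])
    = (fun acc d => acc ++ [if d ∈ inputKeys then
        PySem.List.pyGet? inputList (((PySem.List.index? inputKeys d).getD 0 : Nat) : Int)
      else padWith]) := by
    funext acc d; split <;> rfl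
  rw [hbody, PySem.List.foldl_append_singleton_eq_map, List.nil_append]
  set positions := (PySem.List.enumerate outputKeys).foldl
      (fun d p => d.modify p.2 [] (· ++ [p.1])) PySem.Dict.empty with hposdef
  apply List.ext_getElem?
  intro j
  by_cases hj : j < outputKeys.length
  · have hjinit : j < (List.replicate outputKeys.length padWith).length := by simpa using hj
    have hP : ∀ k i, i ∈ positions.getD k [] → 0 ≤ i := by
      intro k i hi
      obtain ⟨m, _, hm, _⟩ := (pvMemPositions outputKeys i k).1 hi
      omega
    rw [pvScatter_getElem? _ positions _ j hjinit hP]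
    have H : ∀ k, (j : Int) ∈ positions.getD k [] ↔ k = outputKeys[j] := by
      intro k
      rw [pvMemPositions]
      constructor
      · rintro ⟨m, hm, hmj, hk⟩
        have : m = j := by exact_mod_cast hmj
        subst this; exact hk.symm
      · rintro rfl; exact ⟨j, hj, rfl, rfl⟩
    rw [pvLastHit_eq_lookup _ positions _ (outputKeys[j]) H]
    have hmap : (outputKeys.map (fun d => if d ∈ inputKeys then
        PySem.List.pyGet? inputList (((PySem.List.index? inputKeys d).getD 0 : Nat) : Int)
      else padWith))[j]? = some (if outputKeys[j] ∈ inputKeys then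
        PySem.List.pyGet? inputList (((PySem.List.index? inputKeys (outputKeys[j])).getD 0 : Nat) : Int)
      else padWith) := by
      rw [List.getElem?_map, List.getElem?_eq_getElem hj, Option.map_some]
    rw [hmap]
    by_cases hmem : outputKeys[j] ∈ inputKeys
    · obtain ⟨i, hi⟩ := Option.isSome_iff_exists.1
        ((PySem.List.index?_isSome_iff inputKeys (outputKeys[j])).2 hmem)
      have hlt : i < inputList.length := by
        have := hpre (outputKeys[j]) (List.getElem_mem hj) hmem
        rwa [hi, Option.getD_some] at this
      rw [zip_lookup_mem inputKeys inputList (outputKeys[j]) hmem i hi hlt]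
      have hg : PySem.List.pyGet? inputList (i : Int) = some inputList[i] :=
        by rw [PySem.List.pyGet?_natCast]; exact List.getElem?_eq_getElem hlt
      rw [hg, if_pos hmem, hi, Option.getD_some, hg]
    · rw [zip_lookup_not_mem inputKeys inputList (outputKeys[j]) hmem, if_neg hmem,
          List.getElem?_eq_getElem hjinit]
      simp [List.getElem_replicate]
  · have h1 : (outputKeys.map (fun d => if d ∈ inputKeys then
        PySem.List.pyGet? inputList (((PySem.List.index? inputKeys d).getD 0 : Nat) : Int)
      else padWith))[j]? = none := List.getElem?_eq_none (by simpa using hj)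
    have hlen : ((inputKeys.zip inputList).foldl
        (fun st kv =>
          match st.1.pop? kv.1 with
          | some (slots, d') => (d', pvWriteAll slots kv.2 st.2)
          | none => st)
        (positions, List.replicate outputKeys.length padWith)).2.length
        = outputKeys.length := by
      rw [pvScatter_length]; simp
    rw [h1, List.getElem?_eq_none (by rw [hlen]; omega)]
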